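-- pv_equiv track=rewrite | github.com/OmniNode-ai/omnibase | src/omnibase/core/function_discovery.py | _extract_bash_comments
-- ===== SOURCE A (Python) =====
-- from typing import Dict, List, Optional
--
-- def _extract_bash_comments(lines: List[str], func_line: int) -> Optional[str]:
--     """Extract comment block above function."""
--     comment_lines: list[str] = []
--
--     # Look backwards for comment block
--     for i in range(func_line - 1, -1, -1):
--         line = lines[i].strip()
--         if line.startswith("#"):
--             comment_lines.insert(0, line)
--         elif not line:
--             continue
--         else:
--             break
--
--     return "\n".join(comment_lines) if comment_lines else None
-- ===== SOURCE B (Python) =====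
-- from typing import List, Optional
--
-- def _extract_bash_comments(lines: List[str], func_line: int) -> Optional[str]:
--     """Extract comment block above function (boundary scan + forward filter)."""
--     # Phase 1: walk backward only to find where the comment block starts.
--     start = 0
--     for i in range(func_line - 1, -1, -1):
--         s = lines[i].strip()
--         if s and not s.startswith("#"):
--             start = i + 1
--             break
--     # Phase 2: collect the comment lines forward.
--     comments = [s for s in (lines[j].strip() for j in range(start, func_line))
--                 if s.startswith("#")]
--     return "\n".join(comments) if comments else None
-- ===== Notes on version B (the rewrite author's own statement) =====
-- stated objective: simpler
-- what changed: Instead of collecting comment lines inline during one backward scan with insert(0,...), B first scans backward only to locate the block's start boundary, then builds the result with a single forward comprehension over lines[start:func_line], so no front-insertion accumulator is needed.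
import Mathlib
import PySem

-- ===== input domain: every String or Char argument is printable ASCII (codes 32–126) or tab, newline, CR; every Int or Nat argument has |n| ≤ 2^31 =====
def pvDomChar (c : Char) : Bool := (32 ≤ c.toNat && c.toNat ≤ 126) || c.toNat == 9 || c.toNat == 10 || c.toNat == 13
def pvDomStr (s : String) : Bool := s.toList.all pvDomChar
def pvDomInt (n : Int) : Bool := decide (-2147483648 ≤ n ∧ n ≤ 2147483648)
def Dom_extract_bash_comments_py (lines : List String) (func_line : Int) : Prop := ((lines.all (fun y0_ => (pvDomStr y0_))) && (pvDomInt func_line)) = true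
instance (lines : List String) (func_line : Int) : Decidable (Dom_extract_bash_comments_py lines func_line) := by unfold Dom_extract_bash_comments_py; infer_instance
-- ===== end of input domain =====

-- B replaces A's single backward scan with an inline insert(0,...) accumulator by a backward
-- boundary search followed by a forward filter over the block; objective: simpler decomposition.

-- ===== PORT A =====
-- A's backward loop; i is the current index (the Python loop runs i = func_line-1 … 0,
-- so 0 ≤ i; under Pre_ every index is in range, so getD is exact for lines[i]).
def pvALoop (lines : List String) (i : Nat) (acc : List String) : List String :=
  let line := PySem.Str.strip (lines.getD i "")
  if PySem.Str.startswith line "#" then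
    if i = 0 then line :: acc else pvALoop lines (i - 1) (line :: acc)
  else if line = "" then
    if i = 0 then acc else pvALoop lines (i - 1) acc
  else acc
termination_by i
decreasing_by all_goals omega

def extract_bash_comments_py (lines : List String) (func_line : Int) : Option String :=
  if func_line ≤ 0 then none  -- range(func_line-1, -1, -1) is empty
  else
    let comment_lines := pvALoop lines (func_line - 1).toNat []
    if comment_lines = [] then none
    else some (PySem.Str.join "\n" comment_lines)

-- ===== PORT B =====
-- B's phase 1: backward boundary search; returns the start index of the comment block.
def pvBStart (lines : List String) (i : Nat) : Nat :=
  let s := PySem.Str.strip (lines.getD i "")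
  if s ≠ "" ∧ ¬ PySem.Str.startswith s "#" then i + 1
  else if i = 0 then 0 else pvBStart lines (i - 1)
termination_by i
decreasing_by all_goals omega

def extract_bash_comments_py_alt (lines : List String) (func_line : Int) : Option String :=
  let start := if func_line ≤ 0 then 0 else pvBStart lines (func_line - 1).toNat
  -- B's phase 2: forward comprehension over range(start, func_line)
  let comments :=
    ((List.range' start (func_line.toNat - start)).map
        (fun j => PySem.Str.strip (lines.getD j ""))).filter
      (fun s => PySem.Str.startswith s "#")
  if comments = [] then none else some (PySem.Str.join "\n" comments)

-- ===== PRECONDITION & SPEC =====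
-- Pre_ excludes exactly the inputs where Python A raises IndexError:
-- 1 ≤ func_line with func_line > len(lines) (the first access lines[func_line-1] is out of range).
def Pre_extract_bash_comments_py (lines : List String) (func_line : Int) : Prop :=
  func_line ≤ 0 ∨ func_line ≤ (lines.length : Int)
instance (lines : List String) (func_line : Int) : Decidable (Pre_extract_bash_comments_py lines func_line) := by unfold Pre_extract_bash_comments_py; infer_instance

def pvWitness_extract_bash_comments_py : List String × Int := (["# doc", "f() {"], 1)

def Spec_extract_bash_comments_py (lines : List String) (func_line : Int) (out : Option String) : Prop := out = extract_bash_comments_py_alt lines func_line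
instance (lines : List String) (func_line : Int) (out : Option String) : Decidable (Spec_extract_bash_comments_py lines func_line out) := by unfold Spec_extract_bash_comments_py; infer_instance

-- ===== CLAIM (what is proved, stated in full; the proofs are below) =====
def Claim_equal_extract_bash_comments_py : Prop := ∀ (lines : List String) (func_line : Int), Dom_extract_bash_comments_py lines func_line → Pre_extract_bash_comments_py lines func_line → Spec_extract_bash_comments_py lines func_line (extract_bash_comments_py lines func_line)

-- ===== LEMMAS AND PROOFS =====

-- unfolding lemmas for the three cases of each backward scan
theorem pvALoop_comment (lines : List String) (i : Nat) (acc : List String)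
    (h : PySem.Str.startswith (PySem.Str.strip (lines.getD i "")) "#" = true) :
    pvALoop lines i acc =
      if i = 0 then PySem.Str.strip (lines.getD i "") :: acc
      else pvALoop lines (i - 1) (PySem.Str.strip (lines.getD i "") :: acc) := by
  rw [pvALoop, if_pos h]

theorem pvALoop_blank (lines : List String) (i : Nat) (acc : List String)
    (h : PySem.Str.strip (lines.getD i "") = "") :
    pvALoop lines i acc = if i = 0 then acc else pvALoop lines (i - 1) acc := by
  have hsw : ¬ PySem.Str.startswith (PySem.Str.strip (lines.getD i "")) "#" = true := by
    rw [h]; decide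
  rw [pvALoop, if_neg hsw, if_pos h]

theorem pvALoop_stop (lines : List String) (i : Nat) (acc : List String)
    (h : PySem.Str.strip (lines.getD i "") ≠ "")
    (hsw : ¬ PySem.Str.startswith (PySem.Str.strip (lines.getD i "")) "#" = true) :
    pvALoop lines i acc = acc := by
  rw [pvALoop, if_neg hsw, if_neg h]

theorem pvBStart_cont (lines : List String) (i : Nat)
    (h : ¬ (PySem.Str.strip (lines.getD i "") ≠ "" ∧
        ¬ PySem.Str.startswith (PySem.Str.strip (lines.getD i "")) "#" = true)) :
    pvBStart lines i = if i = 0 then 0 else pvBStart lines (i - 1) := by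
  rw [pvBStart, if_neg h]

theorem pvBStart_stop (lines : List String) (i : Nat)
    (h : PySem.Str.strip (lines.getD i "") ≠ "" ∧
        ¬ PySem.Str.startswith (PySem.Str.strip (lines.getD i "")) "#" = true) :
    pvBStart lines i = i + 1 := by
  rw [pvBStart, if_pos h]

theorem pvBStart_le (lines : List String) (i : Nat) : pvBStart lines i ≤ i + 1 := by
  induction i using Nat.strong_induction_on with
  | _ i ih =>
    rw [pvBStart]
    split
    · omega
    · split
      · omega
      · have := ih (i - 1) (by omega)
        omega

-- the heart of the equivalence: A's backward collection equals B's forward filter over the block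
-- splitting off the last index of a block of consecutive indices
theorem pvRangeSnoc (b i : Nat) (hle : b ≤ i) :
    List.range' b (i + 1 - b) = List.range' b (i - b) ++ [i] := by
  have h1 : i + 1 - b = (i - b) + 1 := by omega
  rw [h1, List.range'_concat]
  congr 2
  omega

theorem pvALoop_eq (lines : List String) (i : Nat) (acc : List String) :
    pvALoop lines i acc =
      ((List.range' (pvBStart lines i) (i + 1 - pvBStart lines i)).map
          (fun j => PySem.Str.strip (lines.getD j ""))).filter
        (fun s => PySem.Str.startswith s "#") ++ acc := by
  induction i using Nat.strong_induction_on generalizing acc with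
  | _ i ih =>
    by_cases hsw : PySem.Str.startswith (PySem.Str.strip (lines.getD i "")) "#" = true
    · -- comment line: both scans continue; the filter keeps lines[i]
      have hc : ¬ (PySem.Str.strip (lines.getD i "") ≠ "" ∧
          ¬ PySem.Str.startswith (PySem.Str.strip (lines.getD i "")) "#" = true) :=
        fun h => h.2 hsw
      have hsw2 := hsw; simp at hsw2
      rw [pvALoop_comment lines i acc hsw, pvBStart_cont lines i hc]
      by_cases h0 : i = 0
      · subst h0
        simp [List.filter, hsw2]
      · have hle : pvBStart lines (i - 1) ≤ i := by
          have := pvBStart_le lines (i - 1); omega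
        have h2 : (i - 1) + 1 - pvBStart lines (i - 1) = i - pvBStart lines (i - 1) := by omega
        rw [if_neg h0, if_neg h0, ih (i - 1) (by omega), h2,
          pvRangeSnoc (pvBStart lines (i - 1)) i hle]
        rw [List.map_append, List.filter_append]
        simp [List.filter, hsw2]
    · by_cases hbl : PySem.Str.strip (lines.getD i "") = ""
      · -- blank line: both scans continue; the filter drops lines[i]
        have hc : ¬ (PySem.Str.strip (lines.getD i "") ≠ "" ∧
            ¬ PySem.Str.startswith (PySem.Str.strip (lines.getD i "")) "#" = true) :=
          fun h => h.1 hbl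
        have hsw2 : PySem.Str.startswith (PySem.Str.strip (lines.getD i "")) "#" = false := by
          rw [hbl]; decide
        have hsw3 := hsw2; simp at hsw3
        rw [pvALoop_blank lines i acc hbl, pvBStart_cont lines i hc]
        by_cases h0 : i = 0
        · subst h0
          simp [List.filter, hsw3]
        · have hle : pvBStart lines (i - 1) ≤ i := by
            have := pvBStart_le lines (i - 1); omega
          have h2 : (i - 1) + 1 - pvBStart lines (i - 1) = i - pvBStart lines (i - 1) := by omega
          rw [if_neg h0, if_neg h0, ih (i - 1) (by omega), h2,
            pvRangeSnoc (pvBStart lines (i - 1)) i hle]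
          rw [List.map_append, List.filter_append]
          simp [List.filter, hsw3]
      · -- stopping line: both scans stop; the block above index i is empty
        rw [pvALoop_stop lines i acc hbl hsw, pvBStart_stop lines i ⟨hbl, hsw⟩]
        simp

-- ===== VERDICT (by name: the statement is the Claim_ definition above) =====
theorem extract_bash_comments_py_spec : Claim_equal_extract_bash_comments_py := by
  intro lines func_line _ _
  unfold Spec_extract_bash_comments_py extract_bash_comments_py extract_bash_comments_py_alt
  by_cases h : func_line ≤ 0
  · have h0 : func_line.toNat = 0 := by omega
    simp [h, h0]
  · have hfl : (func_line - 1).toNat = func_line.toNat - 1 := by omega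
    have h1 : func_line.toNat - 1 + 1 = func_line.toNat := by omega
    rw [if_neg h, if_neg h, pvALoop_eq, hfl, h1, List.append_nil]
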